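-- pv_equiv track=rewrite | github.com/koala-man-64/asset-allocation-jobs | scripts/dependency_governance.py | diff_dependency_sets
-- ===== SOURCE A (Python) =====
-- from typing import Dict, List, Tuple
--
-- def diff_dependency_sets(expected: Dict[str, str], observed: Dict[str, str], expected_label: str, observed_label: str) -> List[str]:
--     issues: List[str] = []
--
--     missing = sorted(set(expected) - set(observed))
--     extra = sorted(set(observed) - set(expected))
--
--     for package_name in missing:
--         issues.append(
--             f"Missing in {observed_label}: {expected[package_name]} (present in {expected_label})"
--         )
--
--     for package_name in extra:
--         issues.append(
--             f"Unexpected in {observed_label}: {observed[package_name]} (not in {expected_label})"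
--         )
--
--     common = sorted(set(expected) & set(observed))
--     for package_name in common:
--         if expected[package_name] != observed[package_name]:
--             issues.append(
--                 f"Version mismatch for {package_name}: {expected_label}={expected[package_name]} vs {observed_label}={observed[package_name]}"
--             )
--
--     return issues
-- ===== SOURCE B (Python) =====
-- def diff_dependency_sets(expected, observed, expected_label, observed_label):
--     e_keys = sorted(expected)
--     o_keys = sorted(observed)
--     missing, extra, mismatch = [], [], []
--     i = j = 0
--     while i < len(e_keys) and j < len(o_keys):
--         ke, ko = e_keys[i], o_keys[j]
--         if ke < ko:
--             missing.append(
--                 f"Missing in {observed_label}: {expected[ke]} (present in {expected_label})"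
--             )
--             i += 1
--         elif ko < ke:
--             extra.append(
--                 f"Unexpected in {observed_label}: {observed[ko]} (not in {expected_label})"
--             )
--             j += 1
--         else:
--             if expected[ke] != observed[ke]:
--                 mismatch.append(
--                     f"Version mismatch for {ke}: {expected_label}={expected[ke]} vs {observed_label}={observed[ke]}"
--                 )
--             i += 1
--             j += 1
--     while i < len(e_keys):
--         ke = e_keys[i]
--         missing.append(
--             f"Missing in {observed_label}: {expected[ke]} (present in {expected_label})"
--         )
--         i += 1
--     while j < len(o_keys):
--         ko = o_keys[j]
--         extra.append(
--             f"Unexpected in {observed_label}: {observed[ko]} (not in {expected_label})"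
--         )
--         j += 1
--     return missing + extra + mismatch
-- ===== Notes on version B (the rewrite author's own statement) =====
-- stated objective: alternative
-- what changed: A computes three hash-set operations (difference, reverse difference, intersection), sorts each, and runs three separate loops with dict membership tests; B sorts the two key lists independently and performs a single two-pointer merge-join, classifying each key as missing/extra/mismatch purely by head comparison with no set operations or membership tests, concatenating the three buckets at the end.
import Mathlib
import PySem

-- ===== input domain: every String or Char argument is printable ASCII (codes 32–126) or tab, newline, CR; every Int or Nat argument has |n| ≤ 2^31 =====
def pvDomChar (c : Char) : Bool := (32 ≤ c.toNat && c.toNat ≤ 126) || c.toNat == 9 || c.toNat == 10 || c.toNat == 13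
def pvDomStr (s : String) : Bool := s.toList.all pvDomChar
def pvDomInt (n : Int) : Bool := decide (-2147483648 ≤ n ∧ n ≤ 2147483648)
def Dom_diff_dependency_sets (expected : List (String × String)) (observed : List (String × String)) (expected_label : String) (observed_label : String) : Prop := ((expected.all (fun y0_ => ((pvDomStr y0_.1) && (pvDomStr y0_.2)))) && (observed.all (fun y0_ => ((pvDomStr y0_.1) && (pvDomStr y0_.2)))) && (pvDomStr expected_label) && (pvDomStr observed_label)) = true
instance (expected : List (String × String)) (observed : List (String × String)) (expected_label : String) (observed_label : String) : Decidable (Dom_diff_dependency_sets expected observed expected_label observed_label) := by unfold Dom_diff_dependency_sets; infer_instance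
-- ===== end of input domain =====

-- B replaces A's three hash-set operations (difference / reverse difference / intersection, each
-- sorted and looped separately) by a two-pointer merge-join over the two independently sorted key
-- lists, classifying each key by head comparison alone (objective: alternative).

-- ===== PORT A =====
-- literal port of A: three sorted set operations, three append loops into one shared issues list
def diff_dependency_sets (expected : List (String × String)) (observed : List (String × String)) (expected_label : String) (observed_label : String) : List String :=
  let de := PySem.Dict.ofList expected
  let dob := PySem.Dict.ofList observed
  let missing := PySem.List.sorted (PySem.Set.diff (PySem.Set.ofList de.keys) (PySem.Set.ofList dob.keys)) (fun x => x) false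
  let extra := PySem.List.sorted (PySem.Set.diff (PySem.Set.ofList dob.keys) (PySem.Set.ofList de.keys)) (fun x => x) false
  let issues1 := missing.foldl (fun acc k =>
    acc ++ ["Missing in " ++ observed_label ++ ": " ++ de.getD k "" ++ " (present in " ++ expected_label ++ ")"]) []
  let issues2 := extra.foldl (fun acc k =>
    acc ++ ["Unexpected in " ++ observed_label ++ ": " ++ dob.getD k "" ++ " (not in " ++ expected_label ++ ")"]) issues1
  let common := PySem.List.sorted (PySem.Set.inter (PySem.Set.ofList de.keys) (PySem.Set.ofList dob.keys)) (fun x => x) false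
  common.foldl (fun acc k =>
    if (de.getD k "" != dob.getD k "") then
      acc ++ ["Version mismatch for " ++ k ++ ": " ++ expected_label ++ "=" ++ de.getD k "" ++ " vs " ++ observed_label ++ "=" ++ dob.getD k ""]
    else acc) issues2

-- ===== PORT B =====
-- B's merge-join: the while loop over the two sorted key lists, consuming whichever head is
-- smaller, with the two trailing drain loops as the base cases; acc = (missing, extra, mismatch)
def ddsMerge (de dob : PySem.Dict String String) (expected_label observed_label : String) :
    List String × List String × List String → List String → List String →
    List String × List String × List String
  | acc, [], os =>
      (acc.1,
       acc.2.1 ++ os.map (fun ko => "Unexpected in " ++ observed_label ++ ": " ++ dob.getD ko "" ++ " (not in " ++ expected_label ++ ")"),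
       acc.2.2)
  | acc, ke :: es, [] =>
      (acc.1 ++ (ke :: es).map (fun k => "Missing in " ++ observed_label ++ ": " ++ de.getD k "" ++ " (present in " ++ expected_label ++ ")"),
       acc.2.1, acc.2.2)
  | acc, ke :: es, ko :: os =>
      if ke < ko then
        ddsMerge de dob expected_label observed_label
          (acc.1 ++ ["Missing in " ++ observed_label ++ ": " ++ de.getD ke "" ++ " (present in " ++ expected_label ++ ")"], acc.2.1, acc.2.2)
          es (ko :: os)
      else if ko < ke then
        ddsMerge de dob expected_label observed_label
          (acc.1, acc.2.1 ++ ["Unexpected in " ++ observed_label ++ ": " ++ dob.getD ko "" ++ " (not in " ++ expected_label ++ ")"], acc.2.2)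
          (ke :: es) os
      else
        ddsMerge de dob expected_label observed_label
          (acc.1, acc.2.1,
           if (de.getD ke "" != dob.getD ke "") then
             acc.2.2 ++ ["Version mismatch for " ++ ke ++ ": " ++ expected_label ++ "=" ++ de.getD ke "" ++ " vs " ++ observed_label ++ "=" ++ dob.getD ke ""]
           else acc.2.2)
          es os
  termination_by _ es os => es.length + os.length

def diff_dependency_sets_alt (expected : List (String × String)) (observed : List (String × String)) (expected_label : String) (observed_label : String) : List String :=
  let de := PySem.Dict.ofList expected
  let dob := PySem.Dict.ofList observed
  let e_keys := PySem.List.sorted de.keys (fun x => x) false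
  let o_keys := PySem.List.sorted dob.keys (fun x => x) false
  let r := ddsMerge de dob expected_label observed_label ([], [], []) e_keys o_keys
  r.1 ++ r.2.1 ++ r.2.2

-- ===== PRECONDITION & SPEC =====
def Spec_diff_dependency_sets (expected : List (String × String)) (observed : List (String × String)) (expected_label : String) (observed_label : String) (out : List String) : Prop := out = diff_dependency_sets_alt expected observed expected_label observed_label
instance (expected : List (String × String)) (observed : List (String × String)) (expected_label : String) (observed_label : String) (out : List String) : Decidable (Spec_diff_dependency_sets expected observed expected_label observed_label out) := by unfold Spec_diff_dependency_sets; infer_instance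

-- ===== CLAIM (what is proved, stated in full; the proofs are below) =====
def Claim_equal_diff_dependency_sets : Prop := ∀ (expected : List (String × String)) (observed : List (String × String)) (expected_label : String) (observed_label : String), Dom_diff_dependency_sets expected observed expected_label observed_label → Spec_diff_dependency_sets expected observed expected_label observed_label (diff_dependency_sets expected observed expected_label observed_label)

-- ===== LEMMAS AND PROOFS =====

-- on strictly sorted inputs the merge-join computes the three buckets as filters of the key lists
theorem ddsMerge_spec (de dob : PySem.Dict String String) (el ol : String) :
    ∀ (es os m x mm : List String), es.Pairwise (· < ·) → os.Pairwise (· < ·) →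
    ddsMerge de dob el ol (m, x, mm) es os =
      (m ++ (es.filter (fun k => !(os.contains k))).map
          (fun k => "Missing in " ++ ol ++ ": " ++ de.getD k "" ++ " (present in " ++ el ++ ")"),
       x ++ (os.filter (fun k => !(es.contains k))).map
          (fun k => "Unexpected in " ++ ol ++ ": " ++ dob.getD k "" ++ " (not in " ++ el ++ ")"),
       mm ++ ((es.filter (fun k => os.contains k)).filter (fun k => de.getD k "" != dob.getD k "")).map
          (fun k => "Version mismatch for " ++ k ++ ": " ++ el ++ "=" ++ de.getD k "" ++ " vs " ++ ol ++ "=" ++ dob.getD k "")) := by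
  intro es
  induction es with
  | nil =>
    intro os m x mm _ _
    simp [ddsMerge]
  | cons ke es ihe =>
    intro os
    induction os with
    | nil =>
      intro m x mm _ _
      simp [ddsMerge]
    | cons ko os iho =>
      intro m x mm hpe hpo
      have hpe' : es.Pairwise (· < ·) := hpe.of_cons
      have hpo' : os.Pairwise (· < ·) := hpo.of_cons
      have heke : ∀ y ∈ es, ke < y := fun y hy => List.rel_of_pairwise_cons hpe hy
      have hoko : ∀ y ∈ os, ko < y := fun y hy => List.rel_of_pairwise_cons hpo hy
      by_cases h1 : ke < ko
      · -- ke only: missing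
        have hkem : ke ∉ ko :: os := by
          simp only [List.mem_cons, not_or]
          exact ⟨ne_of_lt h1, fun h => absurd (h1.trans (hoko _ h)) (lt_irrefl ke)⟩
        have hcong : ∀ k ∈ ko :: os, (k ∈ ke :: es) ↔ (k ∈ es) := by
          intro k hk
          have hkek : ke < k := by
            rcases List.mem_cons.mp hk with h | h
            · exact h ▸ h1
            · exact h1.trans (hoko _ h)
          simp only [List.mem_cons, or_iff_right_iff_imp]
          rintro rfl
          exact absurd hkek (lt_irrefl _)
        have hF1 : (ke :: es).filter (fun k => !((ko :: os).contains k))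
            = ke :: es.filter (fun k => !((ko :: os).contains k)) :=
          List.filter_cons_of_pos (by simp [hkem])
        have hF2 : (ko :: os).filter (fun k => !((ke :: es).contains k))
            = (ko :: os).filter (fun k => !(es.contains k)) :=
          List.filter_congr (fun k hk => by simp [hcong k hk])
        have hF3 : (ke :: es).filter (fun k => (ko :: os).contains k)
            = es.filter (fun k => (ko :: os).contains k) :=
          List.filter_cons_of_neg (by simp [hkem])
        rw [ddsMerge, if_pos h1, ihe (ko :: os) _ _ _ hpe' hpo, hF1, hF2, hF3]
        simp [List.append_assoc]
      · by_cases h2 : ko < ke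
        · -- ko only: extra
          have hkom : ko ∉ ke :: es := by
            simp only [List.mem_cons, not_or]
            exact ⟨ne_of_lt h2, fun h => absurd (h2.trans (heke _ h)) (lt_irrefl ko)⟩
          have hcong : ∀ k ∈ ke :: es, (k ∈ ko :: os) ↔ (k ∈ os) := by
            intro k hk
            have hkok : ko < k := by
              rcases List.mem_cons.mp hk with h | h
              · exact h ▸ h2
              · exact h2.trans (heke _ h)
            simp only [List.mem_cons, or_iff_right_iff_imp]
            rintro rfl
            exact absurd hkok (lt_irrefl _)
          have hF1 : (ke :: es).filter (fun k => !((ko :: os).contains k))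
              = (ke :: es).filter (fun k => !(os.contains k)) :=
            List.filter_congr (fun k hk => by simp [hcong k hk])
          have hF2 : (ko :: os).filter (fun k => !((ke :: es).contains k))
              = ko :: os.filter (fun k => !((ke :: es).contains k)) :=
            List.filter_cons_of_pos (by simp [hkom])
          have hF3 : (ke :: es).filter (fun k => (ko :: os).contains k)
              = (ke :: es).filter (fun k => os.contains k) :=
            List.filter_congr (fun k hk => by simp [hcong k hk])
          rw [ddsMerge, if_neg h1, if_pos h2, iho _ _ _ hpe hpo', hF1, hF2, hF3]
          simp [List.append_assoc]
        · -- equal: common key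
          have heq : ke = ko := le_antisymm (not_lt.mp h2) (not_lt.mp h1)
          subst heq
          have hcongE : ∀ k ∈ es, (k ∈ ke :: os) ↔ (k ∈ os) := by
            intro k hk
            have hlt : ke < k := heke _ hk
            simp only [List.mem_cons, or_iff_right_iff_imp]
            rintro rfl
            exact absurd hlt (lt_irrefl _)
          have hcongO : ∀ k ∈ os, (k ∈ ke :: es) ↔ (k ∈ es) := by
            intro k hk
            have hlt : ke < k := hoko _ hk
            simp only [List.mem_cons, or_iff_right_iff_imp]
            rintro rfl
            exact absurd hlt (lt_irrefl _)
          have hF1 : (ke :: es).filter (fun k => !((ke :: os).contains k))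
              = es.filter (fun k => !(os.contains k)) := by
            rw [List.filter_cons_of_neg (by simp)]
            exact List.filter_congr (fun k hk => by simp [hcongE k hk])
          have hF2 : (ke :: os).filter (fun k => !((ke :: es).contains k))
              = os.filter (fun k => !(es.contains k)) := by
            rw [List.filter_cons_of_neg (by simp)]
            exact List.filter_congr (fun k hk => by simp [hcongO k hk])
          have hF3 : (ke :: es).filter (fun k => (ke :: os).contains k)
              = ke :: es.filter (fun k => os.contains k) := by
            rw [List.filter_cons_of_pos (by simp)]
            exact congrArg (List.cons ke) (List.filter_congr (fun k hk => by simp [hcongE k hk]))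
          rw [ddsMerge, if_neg h1, if_neg h2, ihe os _ _ _ hpe' hpo', hF1, hF2, hF3]
          by_cases h3 : (de.getD ke "" != dob.getD ke "") = true
          · simp [List.filter_cons, h3, List.append_assoc]
          · simp [Bool.eq_false_iff.mpr (fun hc => h3 hc)]

-- two strictly increasing lists of strings with the same members are the named sorted list
theorem sorted_eq_of_mem_iff (s ys : List String) (hp : ys.Pairwise (· < ·)) (hs : s.Nodup)
    (hmem : ∀ k, k ∈ ys ↔ k ∈ s) :
    PySem.List.sorted s (fun x => x) false = ys := by
  apply PySem.List.sorted_eq_of_perm_of_pairwise_lt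
  · rw [List.perm_ext_iff_of_nodup hp.nodup hs]
    exact hmem
  · exact hp

-- ===== VERDICT (by name: the statement is the Claim_ definition above) =====
theorem diff_dependency_sets_spec : Claim_equal_diff_dependency_sets := by
  intro expected observed el ol _
  unfold Spec_diff_dependency_sets diff_dependency_sets diff_dependency_sets_alt
  simp only
  set de := PySem.Dict.ofList expected with hde
  set dob := PySem.Dict.ofList observed with hdob
  have hek : de.keys.Nodup := PySem.Dict.nodup_keys_ofList expected
  have hok : dob.keys.Nodup := PySem.Dict.nodup_keys_ofList observed
  set es := PySem.List.sorted de.keys (fun x => x) false with hes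
  set os := PySem.List.sorted dob.keys (fun x => x) false with hos
  have hesn : es.Nodup := ((PySem.List.sorted_perm de.keys _ false).nodup_iff).mpr hek
  have hosn : os.Nodup := ((PySem.List.sorted_perm dob.keys _ false).nodup_iff).mpr hok
  have hesp : es.Pairwise (· < ·) := by
    have hle : es.Pairwise (fun a b => a ≤ b) := PySem.List.sorted_pairwise de.keys (fun x => x)
    exact (hle.and hesn).imp (fun h => lt_of_le_of_ne h.1 h.2)
  have hosp : os.Pairwise (· < ·) := by
    have hle : os.Pairwise (fun a b => a ≤ b) := PySem.List.sorted_pairwise dob.keys (fun x => x)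
    exact (hle.and hosn).imp (fun h => lt_of_le_of_ne h.1 h.2)
  have hmemE : ∀ k, k ∈ es ↔ k ∈ de.keys := fun k => PySem.List.mem_sorted _ _ _ _
  have hmemO : ∀ k, k ∈ os ↔ k ∈ dob.keys := fun k => PySem.List.mem_sorted _ _ _ _
  rw [ddsMerge_spec de dob el ol es os [] [] [] hesp hosp,
      PySem.List.foldl_append_singleton_eq_map, PySem.List.foldl_append_singleton_eq_map,
      PySem.List.foldl_append_if]
  have hM : PySem.List.sorted (PySem.Set.diff (PySem.Set.ofList de.keys) (PySem.Set.ofList dob.keys)) (fun x => x) false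
      = es.filter (fun k => !(os.contains k)) := by
    apply sorted_eq_of_mem_iff
    · exact hesp.sublist List.filter_sublist
    · exact PySem.Set.nodup_diff _ _ (PySem.Set.nodup_ofList _)
    · intro k
      simp only [List.mem_filter, hmemE k, PySem.Set.mem_diff, PySem.Set.mem_ofList,
        List.contains_eq_mem, Bool.not_eq_eq_eq_not, Bool.not_true, decide_eq_false_iff_not,
        hmemO k]
  have hX : PySem.List.sorted (PySem.Set.diff (PySem.Set.ofList dob.keys) (PySem.Set.ofList de.keys)) (fun x => x) false
      = os.filter (fun k => !(es.contains k)) := by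
    apply sorted_eq_of_mem_iff
    · exact hosp.sublist List.filter_sublist
    · exact PySem.Set.nodup_diff _ _ (PySem.Set.nodup_ofList _)
    · intro k
      simp only [List.mem_filter, hmemO k, PySem.Set.mem_diff, PySem.Set.mem_ofList,
        List.contains_eq_mem, Bool.not_eq_eq_eq_not, Bool.not_true, decide_eq_false_iff_not,
        hmemE k]
  have hC : PySem.List.sorted (PySem.Set.inter (PySem.Set.ofList de.keys) (PySem.Set.ofList dob.keys)) (fun x => x) false
      = es.filter (fun k => os.contains k) := by
    apply sorted_eq_of_mem_iff
    · exact hesp.sublist List.filter_sublist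
    · exact PySem.Set.nodup_inter _ _ (PySem.Set.nodup_ofList _)
    · intro k
      simp only [List.mem_filter, hmemE k, PySem.Set.mem_inter, PySem.Set.mem_ofList,
        List.contains_eq_mem, decide_eq_true_eq, hmemO k]
  rw [hM, hX, hC]
  simp [List.append_assoc]
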